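-- pv_equiv track=rewrite | github.com/maotouying665/SortAlgorithms | ShellSort.py | gapinsertsort
-- ===== SOURCE A (Python) =====
-- def gapinsertsort(list,n):
--     for q in range(n):
--         for index in range(q+n,len(list),n):
--             a=list[index]
--             i=index
--             while i>=n:
--                 if a<list[i-n]:
--                     list[i]=list[i-n]
--                 else:
--                     break
--                 i-=n
--             list[i]=a
--     return list
-- ===== SOURCE B (Python) =====
-- def gapinsertsort(list, n):
--     for q in range(n):
--         list[q::n] = sorted(list[q::n])
--     return list
-- ===== Notes on version B (the rewrite author's own statement) =====
-- stated objective: idiomatic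
-- what changed: Replaces the hand-written in-place shift-insertion inner loops with a gather/stable-library-sort/scatter over each stride-n subsequence (list[q::n] = sorted(list[q::n])).
import Mathlib
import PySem

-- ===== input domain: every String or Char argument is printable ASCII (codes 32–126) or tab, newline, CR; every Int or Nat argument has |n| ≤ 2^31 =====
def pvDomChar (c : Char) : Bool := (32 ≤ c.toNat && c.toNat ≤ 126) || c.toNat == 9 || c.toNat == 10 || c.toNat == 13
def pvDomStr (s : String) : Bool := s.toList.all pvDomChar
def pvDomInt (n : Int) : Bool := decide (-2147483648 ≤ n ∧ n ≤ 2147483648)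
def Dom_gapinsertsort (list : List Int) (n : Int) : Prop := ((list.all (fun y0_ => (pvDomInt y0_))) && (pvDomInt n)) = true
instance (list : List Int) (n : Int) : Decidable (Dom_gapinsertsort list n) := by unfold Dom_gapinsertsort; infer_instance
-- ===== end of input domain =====

-- B replaces A's in-place shift-insertion inner loops by gather / stable sort / scatter over each
-- stride-n subsequence (list[q::n] = sorted(list[q::n])); both mutate the Python list in place and
-- return the same object — the equivalence proved here is about the returned value.

-- ===== PORT A =====
-- The inner `while i>=n: if a<list[i-n]: list[i]=list[i-n]; i-=n else: break` followed by `list[i]=a`.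
-- Every call reached from gapinsertsort has 0 < n and 0 ≤ i < len(list), so Nat indexing and the
-- (never-used) default 0 of getD are exact; the `0 < g` conjunct only rules out the unreachable g = 0.
def shiftIns (g : Nat) (a : Int) (i : Nat) (lst : List Int) : List Int :=
  if _h : 0 < g ∧ g ≤ i then
    if a < lst.getD (i - g) 0 then shiftIns g a (i - g) (lst.set i (lst.getD (i - g) 0))
    else lst.set i a
  else lst.set i a
termination_by i
decreasing_by omega

def gapinsertsort (list : List Int) (n : Int) : List Int :=
  (PySem.List.pyRange 0 n 1).foldl (fun lst q =>
    (PySem.List.pyRange (q + n) (PySem.List.len lst) n).foldl (fun l idx =>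
      shiftIns n.toNat (PySem.List.pyGetD l idx 0) idx.toNat l) lst) list

-- ===== PORT B =====
-- takeEvery g xs = xs[::g]; gatherL q g lst = lst[q::g] — exact for 0 ≤ q and g ≥ 1, which hold in the loop.
def takeEvery (g : Nat) : List Int → List Int
  | [] => []
  | x :: xs => x :: takeEvery g (xs.drop (g - 1))
termination_by xs => xs.length
decreasing_by simp

def gatherL (q g : Nat) (lst : List Int) : List Int := takeEvery g (lst.drop q)

def scatterEvery (g : Nat) (ys lst : List Int) : List Int :=
  match ys, lst with
  | [], l => l
  | _ :: _, [] => []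
  | y :: ys', _ :: xs => y :: (xs.take (g - 1) ++ scatterEvery g ys' (xs.drop (g - 1)))
termination_by lst.length
decreasing_by simp

-- scatterL q g ys lst = the slice assignment lst[q::g] = ys (ys has exactly the slice's length here).
def scatterL (q g : Nat) (ys lst : List Int) : List Int := lst.take q ++ scatterEvery g ys (lst.drop q)

def gapinsertsort_alt (list : List Int) (n : Int) : List Int :=
  (PySem.List.pyRange 0 n 1).foldl (fun lst q =>
    scatterL q.toNat n.toNat (PySem.List.sorted (gatherL q.toNat n.toNat lst) (fun x => x) false) lst) list

-- ===== PRECONDITION & SPEC =====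
def Spec_gapinsertsort (list : List Int) (n : Int) (out : List Int) : Prop := out = gapinsertsort_alt list n
instance (list : List Int) (n : Int) (out : List Int) : Decidable (Spec_gapinsertsort list n out) := by unfold Spec_gapinsertsort; infer_instance

-- ===== CLAIM (what is proved, stated in full; the proofs are below) =====
def Claim_equal_gapinsertsort : Prop := ∀ (list : List Int) (n : Int), Dom_gapinsertsort list n → Spec_gapinsertsort list n (gapinsertsort list n)

-- ===== LEMMAS AND PROOFS =====

theorem pv_nat_eq_of_lt_iff {a b : Nat} (h : ∀ k, k < a ↔ k < b) : a = b := by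
  rcases Nat.lt_trichotomy a b with h' | h' | h'
  · have := (h a).mpr h'; omega
  · exact h'
  · have := (h b).mp h'; omega

theorem te_get (g : Nat) (hg : 0 < g) : ∀ (k : Nat) (xs : List Int), (takeEvery g xs)[k]? = xs[k * g]? := by
  intro k
  induction k with
  | zero => intro xs; cases xs <;> simp [takeEvery]
  | succ k ih =>
    intro xs
    cases xs with
    | nil => simp [takeEvery]
    | cons x xs =>
      rw [takeEvery, List.getElem?_cons_succ, ih, List.getElem?_drop]
      obtain ⟨g', rfl⟩ : ∃ g', g = g' + 1 := ⟨g - 1, by omega⟩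
      have e : (k + 1) * (g' + 1) = (g' + k * (g' + 1)) + 1 := by ring
      rw [e, List.getElem?_cons_succ, Nat.add_sub_cancel]

theorem gat_get (q g : Nat) (hg : 0 < g) (lst : List Int) (k : Nat) :
    (gatherL q g lst)[k]? = lst[q + k * g]? := by
  rw [gatherL, te_get g hg, List.getElem?_drop]

theorem gat_lt_iff (q g : Nat) (hg : 0 < g) (lst : List Int) (k : Nat) :
    k < (gatherL q g lst).length ↔ q + k * g < lst.length := by
  have h := gat_get q g hg lst k
  constructor
  · intro hk
    by_contra hb
    have hn : lst[q + k * g]? = none := List.getElem?_eq_none_iff.mpr (by omega)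
    rw [← h, List.getElem?_eq_none_iff] at hn
    omega
  · intro hk
    by_contra hb
    have hn : (gatherL q g lst)[k]? = none := List.getElem?_eq_none_iff.mpr (by omega)
    rw [h, List.getElem?_eq_none_iff] at hn
    omega

theorem gat_getD (q g : Nat) (hg : 0 < g) (lst : List Int) (k : Nat) :
    (gatherL q g lst).getD k 0 = lst.getD (q + k * g) 0 := by
  rw [List.getD_eq_getElem?_getD, List.getD_eq_getElem?_getD, gat_get q g hg]

theorem gat_set_same (q g : Nat) (hg : 0 < g) (lst : List Int) (k : Nat) (v : Int) :
    gatherL q g (lst.set (q + k * g) v) = (gatherL q g lst).set k v := by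
  apply List.ext_getElem?
  intro k'
  rw [gat_get q g hg, List.getElem?_set, List.getElem?_set, gat_get q g hg]
  by_cases h : k = k'
  · subst h
    simp [← gat_lt_iff q g hg]
  · rw [if_neg h, if_neg (fun e => h (Nat.eq_of_mul_eq_mul_right hg (Nat.add_left_cancel e)))]

theorem gat_set_other (q q' g : Nat) (hg : 0 < g) (hq : q < g) (hq' : q' < g) (hne : q' ≠ q)
    (lst : List Int) (k : Nat) (v : Int) :
    gatherL q' g (lst.set (q + k * g) v) = gatherL q' g lst := by
  apply List.ext_getElem?
  intro k'
  rw [gat_get q' g hg, gat_get q' g hg, List.getElem?_set, if_neg]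
  intro e
  apply hne
  have := congrArg (· % g) e
  have h2 : q % g = q' % g := by simpa [Nat.add_mul_mod_self_right] using this
  rw [Nat.mod_eq_of_lt hq, Nat.mod_eq_of_lt hq'] at h2
  exact h2.symm

theorem get_via_gather (g : Nat) (hg : 0 < g) (lst : List Int) (i : Nat) :
    lst[i]? = (gatherL (i % g) g lst)[i / g]? := by
  rw [gat_get _ g hg]
  have e : i % g + i / g * g = i := by rw [Nat.mul_comm]; exact Nat.mod_add_div i g
  rw [e]

theorem shiftIns_sim (g q : Nat) (hg : 0 < g) (hq : q < g) :
    ∀ (t : Nat) (lst : List Int) (a : Int),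
      gatherL q g (shiftIns g a (q + t * g) lst) = shiftIns 1 a t (gatherL q g lst) ∧
      (∀ q', q' < g → q' ≠ q → gatherL q' g (shiftIns g a (q + t * g) lst) = gatherL q' g lst) := by
  intro t
  induction t with
  | zero =>
    intro lst a
    rw [shiftIns.eq_def g, dif_neg (by omega), shiftIns.eq_def 1, dif_neg (by omega)]
    constructor
    · have := gat_set_same q g hg lst 0 a
      simpa using this
    · intro q' hq' hne
      have := gat_set_other q q' g hg hq hq' hne lst 0 a
      simpa using this
  | succ t ih =>
    intro lst a
    have e1 : q + (t + 1) * g - g = q + t * g := by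
      have : (t + 1) * g = t * g + g := by ring
      omega
    have hguard : 0 < g ∧ g ≤ q + (t + 1) * g := ⟨hg, by have h5 : g ≤ (t + 1) * g := Nat.le_mul_of_pos_left g (Nat.succ_pos t); omega⟩
    rw [shiftIns.eq_def g, dif_pos hguard, shiftIns.eq_def 1 a (t+1), dif_pos (by omega : 0 < 1 ∧ 1 ≤ t + 1), e1]
    have egd : lst.getD (q + t * g) 0 = (gatherL q g lst).getD t 0 := (gat_getD q g hg lst t).symm
    rw [egd]
    have e2 : t + 1 - 1 = t := by omega
    rw [e2]
    by_cases hc : a < (gatherL q g lst).getD t 0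
    · rw [if_pos hc, if_pos hc]
      have hset : lst.set (q + (t + 1) * g) ((gatherL q g lst).getD t 0)
          = lst.set (q + (t + 1) * g) ((gatherL q g lst).getD t 0) := rfl
      obtain ⟨ihm, iho⟩ := ih (lst.set (q + (t + 1) * g) ((gatherL q g lst).getD t 0)) a
      constructor
      · rw [ihm, gat_set_same q g hg]
      · intro q' hq' hne
        rw [iho q' hq' hne, gat_set_other q q' g hg hq hq' hne]
    · rw [if_neg hc, if_neg hc]
      exact ⟨gat_set_same q g hg lst (t+1) a, fun q' hq' hne => gat_set_other q q' g hg hq hq' hne lst (t+1) a⟩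

theorem oi_all_le (a : Int) (xs : List Int) (h : ∀ y ∈ xs, ¬ a < y) :
    List.orderedInsert (· < ·) a xs = xs ++ [a] := by
  induction xs with
  | nil => rfl
  | cons x xs ih =>
    rw [List.orderedInsert, if_neg (h x (by simp)), ih (fun y hy => h y (by simp [hy]))]
    rfl

theorem oi_append_last (a x : Int) (xs : List Int) (h : a < x) :
    List.orderedInsert (· < ·) a (xs ++ [x]) = List.orderedInsert (· < ·) a xs ++ [x] := by
  induction xs with
  | nil => simp [List.orderedInsert, h]
  | cons x' xs ih =>
    rw [List.cons_append, List.orderedInsert, List.orderedInsert]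
    by_cases hc : a < x'
    · rw [if_pos hc, if_pos hc]; rfl
    · rw [if_neg hc, if_neg hc, ih]; rfl

theorem oi_pairwise (a : Int) (xs : List Int) (h : xs.Pairwise (· ≤ ·)) :
    (List.orderedInsert (· < ·) a xs).Pairwise (· ≤ ·) := by
  induction xs with
  | nil => simp [List.orderedInsert]
  | cons x xs ih =>
    rw [List.pairwise_cons] at h
    rw [List.orderedInsert]
    by_cases hc : a < x
    · rw [if_pos hc]
      refine List.Pairwise.cons ?_ (List.Pairwise.cons h.1 h.2)
      intro y hy
      rcases List.mem_cons.mp hy with rfl | hy'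
      · exact le_of_lt hc
      · exact le_of_lt (lt_of_lt_of_le hc (h.1 y hy'))
    · rw [if_neg hc]
      refine List.Pairwise.cons ?_ (ih h.2)
      intro y hy
      rcases (List.mem_orderedInsert _).mp hy with rfl | hy'
      · exact le_of_not_gt hc
      · exact h.1 y hy'

theorem insertShift_spec (a : Int) : ∀ (t : Nat) (s : List Int), t < s.length →
    (s.take t).Pairwise (· ≤ ·) →
    shiftIns 1 a t s = List.orderedInsert (· < ·) a (s.take t) ++ s.drop (t + 1) := by
  intro t
  induction t with
  | zero =>
    intro s hlen _
    rw [shiftIns.eq_def, dif_neg (by omega)]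
    rw [List.set_eq_take_cons_drop a hlen]
    rfl
  | succ t ih =>
    intro s hlen hsort
    rw [shiftIns.eq_def, dif_pos (by omega : 0 < 1 ∧ 1 ≤ t + 1)]
    have e2 : t + 1 - 1 = t := by omega
    have htl : t < s.length := by omega
    have hgd : s.getD (t + 1 - 1) 0 = s[t] := by
      rw [e2]; exact List.getD_eq_getElem s 0 htl
    have htake : s.take (t + 1) = s.take t ++ [s[t]] := List.take_succ_eq_append_getElem htl
    have hsort' : (s.take t).Pairwise (· ≤ ·) := by
      rw [htake, List.pairwise_append] at hsort; exact hsort.1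
    by_cases hc : a < s[t]
    · rw [if_pos (by rw [hgd]; exact hc)]
      set s' := s.set (t + 1) (s.getD (t + 1 - 1) 0) with hs'
      have hlen' : t < s'.length := by simp [hs', htl]
      have htk : s'.take t = s.take t := List.take_set_of_le (by omega)
      have ihh := ih s' hlen' (by rw [htk]; exact hsort')
      rw [e2, ihh, htk, htake, oi_append_last a s[t] (s.take t) hc]
      have hdrop : s'.drop (t + 1) = s[t] :: s.drop (t + 2) := by
        rw [hs', hgd, List.drop_set, if_neg (by omega), Nat.sub_self]
        rw [List.drop_eq_getElem_cons hlen, List.set_cons_zero]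
      rw [hdrop]
      simp
    · rw [if_neg (by rw [hgd]; exact hc)]
      have hall : ∀ y ∈ s.take (t + 1), ¬ a < y := by
        intro y hy
        rw [htake] at hy hsort
        rcases List.mem_append.mp hy with hy' | hy'
        · rw [List.pairwise_append] at hsort
          have : y ≤ s[t] := hsort.2.2 y hy' s[t] (by simp)
          exact fun hlt => hc (lt_of_lt_of_le hlt this)
        · simp at hy'
          subst hy'
          exact hc
      rw [oi_all_le a _ hall, List.set_eq_take_cons_drop a hlen]
      simp

def ssort (s : List Int) : Nat → List Int
  | 0 => s
  | j + 1 => shiftIns 1 ((ssort s j).getD (j + 1) 0) (j + 1) (ssort s j)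

theorem ssort_inv (s : List Int) : ∀ (j : Nat), j < s.length →
    (ssort s j).length = s.length ∧ (ssort s j).drop (j + 1) = s.drop (j + 1) ∧
    ((ssort s j).take (j + 1)).Pairwise (· ≤ ·) ∧ (ssort s j).Perm s := by
  intro j
  induction j with
  | zero =>
    intro _
    refine ⟨rfl, rfl, ?_, List.Perm.refl s⟩
    rcases s with _ | ⟨x, s⟩ <;> simp [ssort]
  | succ j ih =>
    intro hlen
    obtain ⟨hL, hD, hP, hperm⟩ := ih (by omega)
    set S := ssort s j with hS
    have hlenS : j + 1 < S.length := by omega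
    have hspec := insertShift_spec (S.getD (j + 1) 0) (j + 1) S hlenS hP
    have hstep : ssort s (j + 1) = List.orderedInsert (· < ·) (S.getD (j + 1) 0) (S.take (j + 1)) ++ S.drop (j + 2) := by
      show shiftIns 1 (S.getD (j + 1) 0) (j + 1) S = _
      rw [hspec]
    have hoiL : (List.orderedInsert (· < ·) (S.getD (j + 1) 0) (S.take (j + 1))).length = j + 2 := by
      rw [List.orderedInsert_length, List.length_take]
      omega
    refine ⟨?_, ?_, ?_, ?_⟩
    · rw [hstep, List.length_append, hoiL, List.length_drop]
      omega
    · rw [hstep]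
      have := List.drop_left (l₁ := List.orderedInsert (· < ·) (S.getD (j + 1) 0) (S.take (j + 1)))
        (l₂ := S.drop (j + 2))
      rw [hoiL] at this
      rw [this]
      have h2 : S.drop (j + 2) = (S.drop (j + 1)).drop 1 := by
        rw [List.drop_drop]
      rw [h2, hD, List.drop_drop]
    · rw [hstep]
      have := List.take_left (l₁ := List.orderedInsert (· < ·) (S.getD (j + 1) 0) (S.take (j + 1)))
        (l₂ := S.drop (j + 2))
      rw [hoiL] at this
      rw [this]
      exact oi_pairwise _ _ (by
        have : (S.take (j + 1)).Pairwise (· ≤ ·) := hP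
        exact this)
    · rw [hstep]
      refine List.Perm.trans ?_ hperm
      refine List.Perm.trans ((List.perm_orderedInsert _ _ _).append_right _) ?_
      have hmid : ((S.getD (j + 1) 0) :: S.take (j + 1)) ++ S.drop (j + 2)
          = (S.getD (j + 1) 0) :: (S.take (j + 1) ++ S.drop (j + 2)) := by simp
      have hgd : S.getD (j + 1) 0 = S[j + 1] := List.getD_eq_getElem S 0 hlenS
      have hsplit : S.take (j + 1) ++ S.drop (j + 1) = S := List.take_append_drop _ _
      have hdc : S.drop (j + 1) = S[j + 1] :: S.drop (j + 2) := List.drop_eq_getElem_cons hlenS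
      rw [hmid, hgd]
      have hmp : (S[j + 1] :: (S.take (j + 1) ++ S.drop (j + 2))).Perm
          (S.take (j + 1) ++ S[j + 1] :: S.drop (j + 2)) := List.perm_middle.symm
      rw [← hdc, hsplit] at hmp
      exact hmp

theorem sorted_eq_ssort (s : List Int) :
    PySem.List.sorted s (fun x => x) false = ssort s (s.length - 1) := by
  rcases Nat.eq_zero_or_pos s.length with h0 | hpos
  · have : s = [] := List.eq_nil_of_length_eq_zero h0
    subst this
    exact PySem.List.sorted_id_eq_of_perm_of_pairwise _ _ (List.Perm.refl _) (List.Pairwise.nil)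
  · obtain ⟨hL, _, hP, hperm⟩ := ssort_inv s (s.length - 1) (by omega)
    refine PySem.List.sorted_id_eq_of_perm_of_pairwise _ _ hperm ?_
    have he : s.length - 1 + 1 = s.length := by omega
    rw [he] at hP
    rwa [List.take_of_length_le (by omega)] at hP

theorem scatterEvery_length (g : Nat) : ∀ (ys lst : List Int), (scatterEvery g ys lst).length = lst.length := by
  intro ys
  induction ys with
  | nil => intro lst; rw [scatterEvery]
  | cons y ys ih =>
    intro lst
    cases lst with
    | nil => rw [scatterEvery]
    | cons x xs =>
      rw [scatterEvery]
      simp only [List.length_cons, List.length_append, List.length_take, List.length_drop, ih]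
      omega

theorem scatterEvery_get (g : Nat) (hg : 0 < g) :
    ∀ (ys lst : List Int) (r k : Nat), r < g → r + k * g < lst.length →
      (scatterEvery g ys lst)[r + k * g]? =
        if r = 0 ∧ k < ys.length then ys[k]? else lst[r + k * g]? := by
  intro ys
  induction ys with
  | nil =>
    intro lst r k _ _
    rw [scatterEvery, if_neg (by simp)]
  | cons y ys ih =>
    intro lst r k hr hlt
    cases lst with
    | nil => simp at hlt
    | cons x xs =>
      rw [scatterEvery]
      rcases Nat.eq_zero_or_pos k with rfl | hk
      · rcases Nat.eq_zero_or_pos r with rfl | hrpos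
        · simp
        · -- index r, 1 ≤ r < g, k = 0
          simp only [List.length_cons] at hlt
          have hidx : r + 0 * g = (r - 1) + 1 := by omega
          rw [hidx, List.getElem?_cons_succ,
              List.getElem?_append_left (by simp only [List.length_take]; omega),
              List.getElem?_take, if_pos (by omega), if_neg (by rintro ⟨h, -⟩; omega),
              List.getElem?_cons_succ]
      · obtain ⟨k', rfl⟩ : ∃ k', k = k' + 1 := ⟨k - 1, by omega⟩
        have hmul : (k' + 1) * g = k' * g + g := by ring
        have hxs : r + k' * g + (g - 1) < xs.length := by
          simp only [List.length_cons] at hlt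
          omega
        have hidx : r + (k' + 1) * g = (g - 1 + (r + k' * g)) + 1 := by omega
        rw [hidx, List.getElem?_cons_succ,
            List.getElem?_append_right (by simp only [List.length_take]; omega)]
        have hlen_take : (xs.take (g - 1)).length = g - 1 := by simp; omega
        rw [hlen_take]
        have : g - 1 + (r + k' * g) - (g - 1) = r + k' * g := by omega
        rw [this]
        rw [ih (xs.drop (g - 1)) r k' hr (by simp; omega)]
        rw [List.getElem?_drop]
        by_cases hcond : r = 0 ∧ k' < ys.length
        · rw [if_pos hcond, if_pos ⟨hcond.1, by simp; omega⟩, List.getElem?_cons_succ]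
        · rw [if_neg hcond, if_neg (by
            intro ⟨h1, h2⟩
            exact hcond ⟨h1, by simp at h2; omega⟩)]
          rw [List.getElem?_cons_succ]

theorem scatterL_length (q g : Nat) (ys lst : List Int) :
    (scatterL q g ys lst).length = lst.length := by
  rw [scatterL, List.length_append, scatterEvery_length, List.length_take, List.length_drop]
  omega

theorem gat_scatter_same (q g : Nat) (hg : 0 < g) (ys lst : List Int)
    (hlen : ys.length = (gatherL q g lst).length) :
    gatherL q g (scatterL q g ys lst) = ys := by
  rcases (Nat.lt_or_ge lst.length q).symm with hq | hq
  · apply List.ext_getElem?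
    intro k
    rw [gat_get q g hg, scatterL,
        List.getElem?_append_right (by simp only [List.length_take]; omega)]
    have hlt : (lst.take q).length = q := by simp only [List.length_take]; omega
    rw [hlt, (by omega : q + k * g - q = k * g)]
    rcases Nat.lt_or_ge (k * g) (lst.drop q).length with hin | hout
    · simp only [List.length_drop] at hin
      have hkys : k < ys.length := by
        rw [hlen, gat_lt_iff q g hg]
        omega
      rw [(show k * g = 0 + k * g by omega),
          scatterEvery_get g hg ys (lst.drop q) 0 k hg (by simp only [List.length_drop]; omega),
          if_pos ⟨rfl, hkys⟩]
    · simp only [List.length_drop] at hout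
      have h1 : (scatterEvery g ys (lst.drop q))[k * g]? = none := by
        rw [List.getElem?_eq_none_iff, scatterEvery_length, List.length_drop]
        omega
      have h2 : ys[k]? = none := by
        rw [List.getElem?_eq_none_iff, hlen]
        have := gat_lt_iff q g hg lst k
        omega
      rw [h1, h2]
  · have h0 : (gatherL q g lst).length = 0 := by
      by_contra h
      have := (gat_lt_iff q g hg lst 0).mp (by omega)
      omega
    have hys : ys = [] := List.eq_nil_of_length_eq_zero (by omega)
    subst hys
    have hsc : scatterL q g [] lst = lst := by
      rw [scatterL, scatterEvery]
      exact List.take_append_drop q lst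
    rw [hsc]
    exact List.eq_nil_of_length_eq_zero h0

theorem gat_scatter_other (q q' g : Nat) (hg : 0 < g) (hq : q < g) (hq' : q' < g) (hne : q' ≠ q)
    (ys lst : List Int) (hlen : ys.length = (gatherL q g lst).length) :
    gatherL q' g (scatterL q g ys lst) = gatherL q' g lst := by
  rcases (Nat.lt_or_ge lst.length q).symm with hqle | hqgt
  · apply List.ext_getElem?
    intro k
    rw [gat_get q' g hg, gat_get q' g hg]
    rcases Nat.lt_or_ge (q' + k * g) lst.length with hin | hout
    · rcases Nat.lt_or_ge (q' + k * g) q with hlt | hge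
      · rw [scatterL, List.getElem?_append_left (by simp; omega), List.getElem?_take, if_pos (by omega)]
      · rw [scatterL, List.getElem?_append_right (by simp; omega)]
        have hlt2 : (lst.take q).length = q := by simp; omega
        rw [hlt2]
        rcases Nat.lt_or_ge q' q with hc | hc
        · -- q' < q, so k ≥ 1; residue r = g - (q - q')
          obtain ⟨k', rfl⟩ : ∃ k', k = k' + 1 := by
            refine ⟨k - 1, ?_⟩
            rcases Nat.eq_zero_or_pos k with rfl | hk
            · omega
            · omega
          have hmul : (k' + 1) * g = k' * g + g := by ring
          have he : q' + (k' + 1) * g - q = (g - (q - q')) + k' * g := by omega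
          rw [he]
          rw [scatterEvery_get g hg ys (lst.drop q) (g - (q - q')) k' (by omega) (by simp; omega)]
          rw [if_neg (by intro ⟨h1, _⟩; omega)]
          rw [List.getElem?_drop, (by omega : q + (g - (q - q') + k' * g) = q' + (k' + 1) * g)]
        · -- q < q', residue r = q' - q
          have he : q' + k * g - q = (q' - q) + k * g := by omega
          rw [he]
          rw [scatterEvery_get g hg ys (lst.drop q) (q' - q) k (by omega) (by simp; omega)]
          rw [if_neg (by intro ⟨h1, _⟩; omega)]
          rw [List.getElem?_drop, (by omega : q + (q' - q + k * g) = q' + k * g)]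
    · have h1 : (scatterL q g ys lst)[q' + k * g]? = none := by
        rw [List.getElem?_eq_none_iff, scatterL_length]
        omega
      have h2 : lst[q' + k * g]? = none := List.getElem?_eq_none_iff.mpr (by omega)
      rw [h1, h2]
  · have h0 : (gatherL q g lst).length = 0 := by
      by_contra h
      have := (gat_lt_iff q g hg lst 0).mp (by omega)
      omega
    have hys : ys = [] := List.eq_nil_of_length_eq_zero (by omega)
    subst hys
    have hsc : scatterL q g [] lst = lst := by
      rw [scatterL, scatterEvery]
      exact List.take_append_drop q lst
    rw [hsc]

theorem innerA (g q : Nat) (hg : 0 < g) (hq : q < g) :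
    ∀ (M : Nat) (lst : List Int),
      gatherL q g ((List.range M).foldl
          (fun l j => shiftIns g (l.getD (q + (1 + j) * g) 0) (q + (1 + j) * g) l) lst)
        = ssort (gatherL q g lst) M ∧
      (∀ q', q' < g → q' ≠ q →
        gatherL q' g ((List.range M).foldl
          (fun l j => shiftIns g (l.getD (q + (1 + j) * g) 0) (q + (1 + j) * g) l) lst)
        = gatherL q' g lst) := by
  intro M
  induction M with
  | zero => intro lst; exact ⟨rfl, fun _ _ _ => rfl⟩
  | succ M ih =>
    intro lst
    rw [List.range_succ, List.foldl_append]
    obtain ⟨ihq, iho⟩ := ih lst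
    set r := (List.range M).foldl
      (fun l j => shiftIns g (l.getD (q + (1 + j) * g) 0) (q + (1 + j) * g) l) lst with hr
    simp only [List.foldl_cons, List.foldl_nil]
    have ha : r.getD (q + (1 + M) * g) 0 = (gatherL q g r).getD (1 + M) 0 :=
      (gat_getD q g hg r (1 + M)).symm
    obtain ⟨hsq, hso⟩ := shiftIns_sim g q hg hq (1 + M) r (r.getD (q + (1 + M) * g) 0)
    constructor
    · rw [hsq, ha, ihq]
      show shiftIns 1 ((ssort (gatherL q g lst) M).getD (1 + M) 0) (1 + M) (ssort (gatherL q g lst) M)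
        = ssort (gatherL q g lst) (M + 1)
      rw [ssort, Nat.add_comm 1 M]
    · intro q' hq' hne
      rw [hso q' hq' hne, iho q' hq' hne]

theorem pass_eq (qi ni : Int) (h0 : 0 ≤ qi) (hlt : qi < ni) (lst : List Int) :
    (PySem.List.pyRange (qi + ni) (PySem.List.len lst) ni).foldl (fun l idx =>
      shiftIns ni.toNat (PySem.List.pyGetD l idx 0) idx.toNat l) lst =
    scatterL qi.toNat ni.toNat (PySem.List.sorted (gatherL qi.toNat ni.toNat lst) (fun x => x) false) lst := by
  set g := ni.toNat with hgdef
  set q := qi.toNat with hqdef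
  have hni : 0 < ni := by omega
  have hg : 0 < g := by omega
  have hq : q < g := by omega
  have hqi : qi = (q : Int) := by omega
  have hnii : ni = (g : Int) := by omega
  set sub := gatherL q g lst with hsub
  set m := sub.length with hm
  -- rewrite the range as a mapped List.range
  rw [PySem.List.len_eq, PySem.List.pyRange_of_pos _ _ hni, List.foldl_map]
  set N := (if qi + ni < (lst.length : Int) then (((lst.length : Int) - (qi + ni) + ni - 1) / ni).toNat else 0) with hN
  -- the step function in Nat form
  have hstep : (fun (l : List Int) (k : Nat) => shiftIns ni.toNat (PySem.List.pyGetD l (qi + ni + ni * (k : Int)) 0) (qi + ni + ni * (k : Int)).toNat l)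
      = (fun (l : List Int) (j : Nat) => shiftIns g (l.getD (q + (1 + j) * g) 0) (q + (1 + j) * g) l) := by
    funext l k
    have hcast : qi + ni + ni * (k : Int) = ((q + (1 + k) * g : Nat) : Int) := by
      rw [hqi, hnii]; push_cast; ring
    rw [hcast, PySem.List.pyGetD_natCast, Int.toNat_natCast]
  rw [hstep]
  -- N = m - 1
  have hNm : N = m - 1 := by
    apply pv_nat_eq_of_lt_iff
    intro j
    have hmi : j + 1 < m ↔ q + (j + 1) * g < lst.length := by
      rw [hm, hsub]
      exact gat_lt_iff q g hg lst (j + 1)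
    rw [hN]
    split_ifs with hcase
    · have hnum : (lst.length : Int) - (qi + ni) + ni - 1 = (lst.length : Int) - qi - 1 := by ring
      rw [hnum, Int.lt_toNat]
      have hdiv : ((j : Int) < ((lst.length : Int) - qi - 1) / ni) ↔ ((j : Int) + 1) * ni ≤ (lst.length : Int) - qi - 1 := by
        rw [Int.lt_iff_add_one_le, Int.le_ediv_iff_mul_le hni]
      have hcast : ((j : Int) + 1) * ni = (((j + 1) * g : Nat) : Int) := by
        rw [hnii]; push_cast; ring
      rw [hdiv, hcast, hqi]
      have key : ((((j + 1) * g : Nat) : Int) ≤ (lst.length : Int) - (q : Int) - 1) ↔ j + 1 < m := by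
        rw [hmi]
        omega
      rw [key]
      omega
    · -- q + g ≥ len : m ≤ 1
      have hm1 : ¬ (1 < m) := by
        rw [hm, hsub, gat_lt_iff q g hg]
        rw [hqi, hnii] at hcase
        have : (1 * g : Nat) = g := by ring
        omega
      omega
  obtain ⟨hA1, hA2⟩ := innerA g q hg hq N lst
  -- B side: sorted = ssort sub (m-1) = ssort sub N
  have hsorted : PySem.List.sorted sub (fun x => x) false = ssort sub N := by
    rw [sorted_eq_ssort, hNm, hm]
  have hlenys : (PySem.List.sorted sub (fun x => x) false).length = sub.length :=
    (PySem.List.sorted_perm sub (fun x => x) false).length_eq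
  apply List.ext_getElem?
  intro i
  rw [get_via_gather g hg _ i, get_via_gather g hg _ i]
  by_cases hres : i % g = q
  · rw [hres, hA1, gat_scatter_same q g hg _ lst hlenys, hsorted]
  · have hq' : i % g < g := Nat.mod_lt i hg
    rw [hA2 (i % g) hq' hres, gat_scatter_other q (i % g) g hg hq hq' hres _ lst hlenys]

-- ===== VERDICT (by name: the statement is the Claim_ definition above) =====
theorem gapinsertsort_spec : Claim_equal_gapinsertsort := by
  intro list n _
  unfold Spec_gapinsertsort gapinsertsort gapinsertsort_alt
  refine PySem.List.foldl_congr_mem _ _ _ _ ?_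
  intro acc x hx
  rw [PySem.List.mem_pyRange_one] at hx
  exact pass_eq x n hx.1 hx.2 acc
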